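-- pv_equiv track=rewrite | github.com/angrydill/ItsyBitser | itsybitser/atomixtream.py | __encode_triad_stream
-- ===== SOURCE A (Python) =====
-- OFFSET = 48
--
-- def __encode_triad_stream(content):
--     length = len(content)
--     result = []
--     for i in range(0, (length + 1) // 2):
--         index = 2 * i
--         byte = content[index]
--         try:
--             byte += content[index + 1] << 3
--         except IndexError:
--             pass
--         result.append(chr(byte + OFFSET))
--     result = "".join(result)
--     return result
-- ===== SOURCE B (Python) =====
-- OFFSET = 48
--
-- def __encode_triad_stream(content):
--     # Build the encoding back-to-front: pop bytes off the end of a stack copy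
--     # (lone odd byte first, then complete pairs), then reverse once at the end.
--     stack = list(content)
--     pieces = []
--     if len(stack) % 2:
--         pieces.append(chr(stack.pop() + OFFSET))
--     while stack:
--         hi = stack.pop()
--         lo = stack.pop()
--         pieces.append(chr(lo + (hi << 3) + OFFSET))
--     pieces.reverse()
--     return "".join(pieces)
-- ===== Notes on version B (the rewrite author's own statement) =====
-- stated objective: alternative
-- what changed: A walks pair indices forward with index arithmetic and a try/except IndexError for the odd tail; B treats the input as a stack, popping the lone odd byte and then complete pairs off the END, building the output back-to-front and reversing it once at the end.
import Mathlib
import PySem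

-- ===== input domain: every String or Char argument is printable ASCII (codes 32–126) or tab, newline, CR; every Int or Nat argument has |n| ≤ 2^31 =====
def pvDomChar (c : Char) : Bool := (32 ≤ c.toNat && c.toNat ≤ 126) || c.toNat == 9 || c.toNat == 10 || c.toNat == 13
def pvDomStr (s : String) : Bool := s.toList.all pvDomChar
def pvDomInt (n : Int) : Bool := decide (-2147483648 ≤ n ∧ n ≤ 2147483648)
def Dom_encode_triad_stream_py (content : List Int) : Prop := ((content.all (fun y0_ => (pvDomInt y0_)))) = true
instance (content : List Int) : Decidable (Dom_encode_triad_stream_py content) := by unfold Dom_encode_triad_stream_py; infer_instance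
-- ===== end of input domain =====

-- B builds the encoding back-to-front by popping the lone odd byte and then complete pairs off the end of a stack copy, reversing once at the end — an alternative traversal order to A's forward indexed loop with try/except; same cost.


-- ===== PORT A =====
-- chr(x) is ported as Char.ofNat x.toNat (exact under Pre_, where every computed code point is a valid
-- non-surrogate scalar value); 'h << 3' is ported as h * 8 (exact for every Python int).
def encode_triad_stream_py (content : List Int) : String :=
  let length : Int := (content.length : Int)
  let result : List Char :=
    (PySem.List.pyRange 0 (PySem.Int.floordiv (length + 1) 2) 1).foldl
      (fun acc i =>
        let index : Int := 2 * i
        let byte : Int := PySem.List.pyGetD content index 0   -- content[index]: always in range in this loop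
        let byte : Int :=
          match PySem.List.pyGet? content (index + 1) with    -- try: content[index+1]  except IndexError: pass
          | some h => byte + h * 8
          | none => byte
        acc ++ [Char.ofNat ((byte + 48).toNat)])
      []
  String.ofList result

-- ===== PORT B =====
-- the 'while stack:' loop of Source B: stack.pop() = take the last element (getLast) and drop it (dropLast).
-- The inner 'stack.pop()' on an empty stack would raise IndexError in Python; it is unreachable here
-- (the loop runs only on even-length stacks) and the port returns the pieces accumulated so far there.
def pvPopLoop (stack : List Int) (pieces : List Char) : List Char :=
  if hs : stack = [] then pieces
  else
    let hi : Int := stack.getLastD 0      -- stack.pop(): nonempty here, the default is never used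
    let s1 : List Int := stack.dropLast
    if hs1 : s1 = [] then pieces
    else
      let lo : Int := s1.getLastD 0
      let s2 : List Int := s1.dropLast
      pvPopLoop s2 (pieces ++ [Char.ofNat ((lo + hi * 8 + 48).toNat)])
termination_by stack.length
decreasing_by
  have hpos : 0 < stack.length := List.length_pos_iff.mpr hs
  simp only [s2, s1, List.length_dropLast]
  omega

def encode_triad_stream_py_alt (content : List Int) : String :=
  let stack : List Int := content
  let sp : List Int × List Char :=
    if stack.length % 2 = 1 then
      -- stack.pop(): list nonempty here (odd length), getLastD's default is never used
      (stack.dropLast, [Char.ofNat ((stack.getLastD 0 + 48).toNat)])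
    else (stack, [])
  let pieces : List Char := pvPopLoop sp.1 sp.2
  String.ofList pieces.reverse

-- ===== PRECONDITION & SPEC =====
-- Pre_ excludes inputs on which chr raises ValueError (a computed code point below 0 or above 0x10FFFF — there A
-- raises instead of returning) and inputs whose code point lands in the surrogate range U+D800–U+DFFF, where A
-- returns a lone-surrogate Python string that a Lean String/Char cannot represent.
def pvOkCode (n : Int) : Bool := decide (0 ≤ n ∧ n ≤ 1114111 ∧ ¬ (55296 ≤ n ∧ n ≤ 57343))

def pvGoodPairs : List Int → Bool
  | [] => true
  | [x] => pvOkCode (x + 48)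
  | lo :: hi :: rest => pvOkCode (lo + hi * 8 + 48) && pvGoodPairs rest

def Pre_encode_triad_stream_py (content : List Int) : Prop := pvGoodPairs content = true
instance (content : List Int) : Decidable (Pre_encode_triad_stream_py content) := by
  unfold Pre_encode_triad_stream_py; infer_instance

def pvWitness_encode_triad_stream_py : List Int := [1, 2, 7]

def Spec_encode_triad_stream_py (content : List Int) (out : String) : Prop := out = encode_triad_stream_py_alt content
instance (content : List Int) (out : String) : Decidable (Spec_encode_triad_stream_py content out) := by unfold Spec_encode_triad_stream_py; infer_instance

-- ===== CLAIM (what is proved, stated in full; the proofs are below) =====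
def Claim_equal_encode_triad_stream_py : Prop := ∀ (content : List Int), Dom_encode_triad_stream_py content → Pre_encode_triad_stream_py content → Spec_encode_triad_stream_py content (encode_triad_stream_py content)

-- ===== LEMMAS AND PROOFS =====

-- common specification: the triad characters, pair by pair from the front
def pvPairs : List Int → List Char
  | [] => []
  | [x] => [Char.ofNat ((x + 48).toNat)]
  | lo :: hi :: rest => Char.ofNat ((lo + hi * 8 + 48).toNat) :: pvPairs rest

lemma pv_fdiv_cast (n : Nat) : PySem.Int.floordiv ((n : Int) + 1) 2 = (((n + 1) / 2 : Nat) : Int) := by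
  show ((n : Int) + 1).fdiv 2 = _
  rw [Int.fdiv_eq_ediv]
  simp

-- A's loop, as a map over the pair indices
lemma pvA_eq (xs : List Int) :
    encode_triad_stream_py xs =
      String.ofList ((List.range ((xs.length + 1) / 2)).map (fun k =>
        Char.ofNat ((xs.getD (2 * k) 0 +
          (match xs[2 * k + 1]? with | some h => h * 8 | none => 0) + 48).toNat))) := by
  unfold encode_triad_stream_py
  dsimp only
  rw [pv_fdiv_cast, PySem.List.pyRange_zero_natCast,
    List.foldl_map, PySem.List.foldl_append_singleton_eq_map, List.nil_append]
  refine congrArg _ (List.map_congr_left ?_)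
  intro k _
  have h1 : 2 * (k : Int) = ((2 * k : Nat) : Int) := by push_cast; ring
  have h2 : ((2 * k : Nat) : Int) + 1 = ((2 * k + 1 : Nat) : Int) := by push_cast; ring
  rw [h1, h2, PySem.List.pyGetD_natCast, PySem.List.pyGet?_natCast]
  cases xs[2 * k + 1]? with
  | none => simp [List.getD]
  | some v => simp [List.getD]

-- the map over pair indices IS pvPairs
lemma pvA_pairs (xs : List Int) :
    (List.range ((xs.length + 1) / 2)).map (fun k =>
        Char.ofNat ((xs.getD (2 * k) 0 +
          (match xs[2 * k + 1]? with | some h => h * 8 | none => 0) + 48).toNat)) = pvPairs xs := by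
  induction xs using pvPairs.induct with
  | case1 => simp [pvPairs]
  | case2 x => simp [pvPairs, List.getD]
  | case3 lo hi rest ih =>
    have hlen : ((lo :: hi :: rest).length + 1) / 2 = (rest.length + 1) / 2 + 1 := by
      simp; omega
    rw [hlen, List.range_succ_eq_map, List.map_cons, List.map_map]
    have h0 : Char.ofNat (((lo :: hi :: rest).getD 0 0 +
        (match (lo :: hi :: rest)[1]? with | some h => h * 8 | none => 0) + 48).toNat)
        = Char.ofNat ((lo + hi * 8 + 48).toNat) := by simp [List.getD]
    rw [h0]
    have hstep : ∀ k : Nat,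
        ((fun k => Char.ofNat ((lo :: hi :: rest).getD (2 * k) 0 +
            (match (lo :: hi :: rest)[2 * k + 1]? with | some h => h * 8 | none => 0) + 48).toNat) ∘ Nat.succ) k
        = Char.ofNat ((rest.getD (2 * k) 0 +
            (match rest[2 * k + 1]? with | some h => h * 8 | none => 0) + 48).toNat) := by
      intro k
      have e1 : 2 * Nat.succ k = 2 * k + 1 + 1 := by omega
      have e2 : 2 * Nat.succ k + 1 = 2 * k + 1 + 1 + 1 := by omega
      simp only [Function.comp_apply, e1, List.getD_cons_succ, List.getElem?_cons_succ]
    rw [List.map_congr_left (fun k _ => hstep k), ih]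
    rfl

-- appending one complete pair to an even-length prefix appends its triad character
lemma pvPairs_append_pair (lo hi : Int) :
    ∀ (zs : List Int), zs.length % 2 = 0 →
      pvPairs (zs ++ [lo, hi]) = pvPairs zs ++ [Char.ofNat ((lo + hi * 8 + 48).toNat)] := by
  intro zs
  induction zs using pvPairs.induct with
  | case1 => intro _; simp [pvPairs]
  | case2 x => intro h; simp at h
  | case3 a b rest ih =>
    intro h
    simp only [List.length_cons] at h
    have : rest.length % 2 = 0 := by omega
    simp [pvPairs, ih this]

-- appending a lone trailing byte to an even-length prefix appends its character
lemma pvPairs_append_single (t : Int) :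
    ∀ (zs : List Int), zs.length % 2 = 0 →
      pvPairs (zs ++ [t]) = pvPairs zs ++ [Char.ofNat ((t + 48).toNat)] := by
  intro zs
  induction zs using pvPairs.induct with
  | case1 => intro _; simp [pvPairs]
  | case2 x => intro h; simp at h
  | case3 a b rest ih =>
    intro h
    simp only [List.length_cons] at h
    have : rest.length % 2 = 0 := by omega
    simp [pvPairs, ih this]

lemma pvPopLoop_nil (pieces : List Char) : pvPopLoop [] pieces = pieces := by
  unfold pvPopLoop; simp

lemma pvPopLoop_step (zs : List Int) (lo hi : Int) (pieces : List Char) :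
    pvPopLoop (zs ++ [lo, hi]) pieces
      = pvPopLoop zs (pieces ++ [Char.ofNat ((lo + hi * 8 + 48).toNat)]) := by
  rw [pvPopLoop]
  have hne : zs ++ [lo, hi] ≠ [] := by simp
  rw [dif_neg hne]
  have hlast : (zs ++ [lo, hi]).getLastD 0 = hi := by
    rw [show zs ++ [lo, hi] = (zs ++ [lo]) ++ [hi] by simp, List.getLastD_concat]
  have hdrop : (zs ++ [lo, hi]).dropLast = zs ++ [lo] := by
    rw [show zs ++ [lo, hi] = (zs ++ [lo]) ++ [hi] by simp, List.dropLast_concat]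
  simp only [hlast, hdrop]
  have hne1 : zs ++ [lo] ≠ [] := by simp
  rw [dif_neg hne1]
  simp only [List.getLastD_concat, List.dropLast_concat]

-- the pop loop, on an even-length stack, emits the pair characters back-to-front
lemma pvPopLoop_pairs_aux :
    ∀ (n : Nat) (zs : List Int), zs.length ≤ n → zs.length % 2 = 0 → ∀ (pieces : List Char),
      pvPopLoop zs pieces = pieces ++ (pvPairs zs).reverse := by
  intro n
  induction n with
  | zero =>
    intro zs hle _ pieces
    have hz : zs = [] := List.length_eq_zero_iff.mp (by omega)
    subst hz; simp [pvPopLoop_nil, pvPairs]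
  | succ n ih =>
    intro zs hle hev pieces
    by_cases hz : zs = []
    · subst hz; simp [pvPopLoop_nil, pvPairs]
    · obtain ⟨ys, hi, hyt⟩ := (List.eq_nil_or_concat zs).resolve_left hz
      have hys : ys ≠ [] := by
        intro h
        rw [hyt, h] at hev
        simp at hev
      obtain ⟨front, lo, hft⟩ := (List.eq_nil_or_concat ys).resolve_left hys
      have hfe : zs = front ++ [lo, hi] := by
        rw [hyt, hft]; simp
      have hlen : zs.length = front.length + 2 := by rw [hfe]; simp
      have hfl : front.length % 2 = 0 := by omega
      have hle' : front.length ≤ n := by omega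
      rw [hfe, pvPopLoop_step, ih front hle' hfl,
        pvPairs_append_pair lo hi front hfl]
      simp

lemma pvPopLoop_pairs (zs : List Int) (hev : zs.length % 2 = 0) (pieces : List Char) :
    pvPopLoop zs pieces = pieces ++ (pvPairs zs).reverse :=
  pvPopLoop_pairs_aux zs.length zs le_rfl hev pieces

-- B computes pvPairs
lemma pvB_pairs (xs : List Int) : encode_triad_stream_py_alt xs = String.ofList (pvPairs xs) := by
  unfold encode_triad_stream_py_alt
  by_cases hodd : xs.length % 2 = 1
  · have hne : xs ≠ [] := by intro h; rw [h] at hodd; simp at hodd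
    obtain ⟨ys, t, hyt⟩ := (List.eq_nil_or_concat xs).resolve_left hne
    rw [List.concat_eq_append] at hyt
    have hyl : ys.length % 2 = 0 := by
      have := congrArg List.length hyt; simp at this; omega
    have hdrop : xs.dropLast = ys := by rw [hyt, List.dropLast_concat]
    have hlastD : xs.getLastD 0 = t := by
      rw [hyt, List.getLastD_concat]
    simp only [if_pos hodd, hdrop, hlastD]
    rw [pvPopLoop_pairs ys hyl, hyt, pvPairs_append_single t ys hyl]
    simp
  · have hev : xs.length % 2 = 0 := by omega
    simp only [if_neg hodd]
    rw [pvPopLoop_pairs xs hev]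
    simp

theorem pv_main (xs : List Int) : encode_triad_stream_py xs = encode_triad_stream_py_alt xs := by
  rw [pvA_eq, pvA_pairs, pvB_pairs]

-- ===== VERDICT (by name: the statement is the Claim_ definition above) =====
theorem encode_triad_stream_py_spec : Claim_equal_encode_triad_stream_py := by
  intro content _ _
  unfold Spec_encode_triad_stream_py
  exact pv_main content
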